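-- pv_equiv track=rewrite | github.com/mirazchiev/SoftUni | Fundamentals/Basic Syntax, Conditional Statements and Loops/More Exercises/sum_of_a_beach.py | beach_counter
-- ===== SOURCE A (Python) =====
-- def beach_counter(string: str):
--     counter = 0
--     for index in range(len(string)):
--
--         if (len(string) - index) >= 4:
--             if string[index] == "s":
--                 if string[index + 1] == "a":
--                     if string[index + 2] == "n":
--                         if string[index + 3] == "d":
--                             counter += 1
--
--         if (len(string) - index) >= 5:
--             if string[index] == "w":
--                 if string[index + 1] == "a":
--                     if string[index + 2] == "t":
--                         if string[index + 3] == "e":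
--                             if string[index + 4] == "r":
--                                 counter += 1
--
--         if (len(string) - index) >= 4:
--             if string[index] == "f":
--                 if string[index + 1] == "i":
--                     if string[index + 2] == "s":
--                         if string[index + 3] == "h":
--                             counter += 1
--
--         if (len(string) - index) >= 3:
--             if string[index] == "s":
--                 if string[index + 1] == "u":
--                     if string[index + 2] == "n":
--                         counter += 1
--
--     return counter
-- ===== SOURCE B (Python) =====
-- def beach_counter(string: str):
--     return sum(string.count(w) for w in ("sand", "water", "fish", "sun"))
-- ===== Notes on version B (the rewrite author's own statement) =====
-- stated objective: idiomatic
-- what changed: Replaces the manual per-index loop with nested character comparisons by four library substring counts (str.count), summed; exact because none of the four words can overlap itself.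
import Mathlib
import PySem

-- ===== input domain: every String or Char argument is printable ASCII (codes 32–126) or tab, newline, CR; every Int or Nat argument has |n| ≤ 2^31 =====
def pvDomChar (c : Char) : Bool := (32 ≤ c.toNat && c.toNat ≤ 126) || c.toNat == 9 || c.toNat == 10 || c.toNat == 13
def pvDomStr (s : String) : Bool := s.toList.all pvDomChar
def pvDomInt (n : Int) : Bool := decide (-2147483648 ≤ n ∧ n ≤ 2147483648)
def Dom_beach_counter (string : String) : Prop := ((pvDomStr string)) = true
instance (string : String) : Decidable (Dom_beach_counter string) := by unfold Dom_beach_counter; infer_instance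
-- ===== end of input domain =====

-- B replaces the manual per-index loop with four library substring counts, summed (idiomatic; exact
-- because none of the four words can overlap itself).

-- ===== PORT A =====
def beach_counter (string : String) : Int :=
  (PySem.List.pyRange 0 (PySem.Str.len string)).foldl (fun counter index =>
    let counter :=
      if PySem.Str.len string - index ≥ 4 then
        if PySem.Str.pyGet? string index = some 's' then
          if PySem.Str.pyGet? string (index + 1) = some 'a' then
            if PySem.Str.pyGet? string (index + 2) = some 'n' then
              if PySem.Str.pyGet? string (index + 3) = some 'd' then counter + 1
              else counter
            else counter
          else counter
        else counter
      else counter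
    let counter :=
      if PySem.Str.len string - index ≥ 5 then
        if PySem.Str.pyGet? string index = some 'w' then
          if PySem.Str.pyGet? string (index + 1) = some 'a' then
            if PySem.Str.pyGet? string (index + 2) = some 't' then
              if PySem.Str.pyGet? string (index + 3) = some 'e' then
                if PySem.Str.pyGet? string (index + 4) = some 'r' then counter + 1
                else counter
              else counter
            else counter
          else counter
        else counter
      else counter
    let counter :=
      if PySem.Str.len string - index ≥ 4 then
        if PySem.Str.pyGet? string index = some 'f' then
          if PySem.Str.pyGet? string (index + 1) = some 'i' then
            if PySem.Str.pyGet? string (index + 2) = some 's' then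
              if PySem.Str.pyGet? string (index + 3) = some 'h' then counter + 1
              else counter
            else counter
          else counter
        else counter
      else counter
    let counter :=
      if PySem.Str.len string - index ≥ 3 then
        if PySem.Str.pyGet? string index = some 's' then
          if PySem.Str.pyGet? string (index + 1) = some 'u' then
            if PySem.Str.pyGet? string (index + 2) = some 'n' then counter + 1
            else counter
          else counter
        else counter
      else counter
    counter) 0

-- ===== PORT B =====
def beach_counter_alt (string : String) : Int :=
  ([("sand" : String), "water", "fish", "sun"].map
    (fun w => (PySem.Str.count string w : Int))).sum

-- ===== PRECONDITION & SPEC =====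
def Spec_beach_counter (string : String) (out : Int) : Prop := out = beach_counter_alt string
instance (string : String) (out : Int) : Decidable (Spec_beach_counter string out) := by unfold Spec_beach_counter; infer_instance

-- ===== CLAIM (what is proved, stated in full; the proofs are below) =====
def Claim_equal_beach_counter : Prop := ∀ (string : String), Dom_beach_counter string → Spec_beach_counter string (beach_counter string)

-- ===== LEMMAS AND PROOFS =====

-- number of suffixes of cs having w as a prefix (= occurrence count at every start position)
def suffCount (w : List Char) : List Char → Nat
  | [] => 0
  | c :: t => (if w.isPrefixOf (c :: t) then 1 else 0) + suffCount w t

lemma sum_ind_eq_suffCount (w : List Char) :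
    ∀ cs : List Char,
      ((List.range cs.length).map
        (fun j => if w.isPrefixOf (cs.drop j) then (1 : Int) else 0)).sum
        = (suffCount w cs : Int) := by
  intro cs
  induction cs with
  | nil => simp [suffCount]
  | cons c t ih =>
    simp only [List.length_cons, List.range_succ_eq_map, List.map_cons, List.map_map,
      List.sum_cons, List.drop_zero, suffCount]
    have : (List.map ((fun j => if w.isPrefixOf ((c :: t).drop j) then (1 : Int) else 0) ∘ Nat.succ)
        (List.range t.length)).sum
        = ((List.range t.length).map (fun j => if w.isPrefixOf (t.drop j) then (1 : Int) else 0)).sum := by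
      apply congrArg List.sum
      apply List.map_congr_left
      intro j _
      simp [Function.comp, List.drop_succ_cons]
    rw [this, ih]
    split <;> push_cast <;> ring

lemma prefix3_iff (l : List Char) (a b c : Char) :
    ([a, b, c].isPrefixOf l = true) ↔ (l[0]? = some a ∧ l[1]? = some b ∧ l[2]? = some c) := by
  rcases l with _ | ⟨x, _ | ⟨y, _ | ⟨z, r⟩⟩⟩ <;>
    simp [List.isPrefixOf] <;> tauto

lemma prefix4_iff (l : List Char) (a b c d : Char) :
    ([a, b, c, d].isPrefixOf l = true) ↔
      (l[0]? = some a ∧ l[1]? = some b ∧ l[2]? = some c ∧ l[3]? = some d) := by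
  rcases l with _ | ⟨x, _ | ⟨y, _ | ⟨z, _ | ⟨u, r⟩⟩⟩⟩ <;>
    simp [List.isPrefixOf] <;> tauto

lemma prefix5_iff (l : List Char) (a b c d e : Char) :
    ([a, b, c, d, e].isPrefixOf l = true) ↔
      (l[0]? = some a ∧ l[1]? = some b ∧ l[2]? = some c ∧ l[3]? = some d ∧ l[4]? = some e) := by
  rcases l with _ | ⟨x, _ | ⟨y, _ | ⟨z, _ | ⟨u, _ | ⟨v, r⟩⟩⟩⟩⟩ <;>
    simp [List.isPrefixOf] <;> tauto

lemma block3 (s : String) (j : Nat) (a b c : Char) (counter : Int) :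
    (if PySem.Str.len s - (j : Int) ≥ 3 then
      if PySem.Str.pyGet? s (j : Int) = some a then
        if PySem.Str.pyGet? s ((j : Int) + 1) = some b then
          if PySem.Str.pyGet? s ((j : Int) + 2) = some c then counter + 1
          else counter
        else counter
      else counter
    else counter)
    = counter + (if [a, b, c].isPrefixOf (s.toList.drop j) then (1 : Int) else 0) := by
  have h0 : PySem.Str.pyGet? s (j : Int) = s.toList[j]? := by
    rw [PySem.Str.pyGet?_eq, PySem.Chars.pyGet?_eq_listPyGet?, PySem.List.pyGet?_natCast]
  have h1 : PySem.Str.pyGet? s ((j : Int) + 1) = s.toList[j + 1]? := by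
    rw [PySem.Str.pyGet?_eq, PySem.Chars.pyGet?_eq_listPyGet?,
      show ((j : Int) + 1) = ((j + 1 : Nat) : Int) by push_cast; ring, PySem.List.pyGet?_natCast]
  have h2 : PySem.Str.pyGet? s ((j : Int) + 2) = s.toList[j + 2]? := by
    rw [PySem.Str.pyGet?_eq, PySem.Chars.pyGet?_eq_listPyGet?,
      show ((j : Int) + 2) = ((j + 2 : Nat) : Int) by push_cast; ring, PySem.List.pyGet?_natCast]
  rw [PySem.Str.len_eq, h0, h1, h2]
  by_cases h : j + 3 ≤ s.toList.length
  · rw [if_pos (by omega)]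
    have hp := prefix3_iff (s.toList.drop j) a b c
    simp only [List.getElem?_drop] at hp
    split_ifs <;> simp_all
  · rw [if_neg (by omega)]
    have hnone : s.toList[j + 2]? = none := by
      rw [List.getElem?_eq_none_iff]; omega
    have hp : ¬ ([a, b, c].isPrefixOf (s.toList.drop j) = true) := by
      rw [prefix3_iff]
      simp [List.getElem?_drop, hnone]
    simp [hp]

lemma block4 (s : String) (j : Nat) (a b c d : Char) (counter : Int) :
    (if PySem.Str.len s - (j : Int) ≥ 4 then
      if PySem.Str.pyGet? s (j : Int) = some a then
        if PySem.Str.pyGet? s ((j : Int) + 1) = some b then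
          if PySem.Str.pyGet? s ((j : Int) + 2) = some c then
            if PySem.Str.pyGet? s ((j : Int) + 3) = some d then counter + 1
            else counter
          else counter
        else counter
      else counter
    else counter)
    = counter + (if [a, b, c, d].isPrefixOf (s.toList.drop j) then (1 : Int) else 0) := by
  have h0 : PySem.Str.pyGet? s (j : Int) = s.toList[j]? := by
    rw [PySem.Str.pyGet?_eq, PySem.Chars.pyGet?_eq_listPyGet?, PySem.List.pyGet?_natCast]
  have h1 : PySem.Str.pyGet? s ((j : Int) + 1) = s.toList[j + 1]? := by
    rw [PySem.Str.pyGet?_eq, PySem.Chars.pyGet?_eq_listPyGet?,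
      show ((j : Int) + 1) = ((j + 1 : Nat) : Int) by push_cast; ring, PySem.List.pyGet?_natCast]
  have h2 : PySem.Str.pyGet? s ((j : Int) + 2) = s.toList[j + 2]? := by
    rw [PySem.Str.pyGet?_eq, PySem.Chars.pyGet?_eq_listPyGet?,
      show ((j : Int) + 2) = ((j + 2 : Nat) : Int) by push_cast; ring, PySem.List.pyGet?_natCast]
  have h3 : PySem.Str.pyGet? s ((j : Int) + 3) = s.toList[j + 3]? := by
    rw [PySem.Str.pyGet?_eq, PySem.Chars.pyGet?_eq_listPyGet?,
      show ((j : Int) + 3) = ((j + 3 : Nat) : Int) by push_cast; ring, PySem.List.pyGet?_natCast]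
  rw [PySem.Str.len_eq, h0, h1, h2, h3]
  by_cases h : j + 4 ≤ s.toList.length
  · rw [if_pos (by omega)]
    have hp := prefix4_iff (s.toList.drop j) a b c d
    simp only [List.getElem?_drop] at hp
    split_ifs <;> simp_all
  · rw [if_neg (by omega)]
    have hnone : s.toList[j + 3]? = none := by
      rw [List.getElem?_eq_none_iff]; omega
    have hp : ¬ ([a, b, c, d].isPrefixOf (s.toList.drop j) = true) := by
      rw [prefix4_iff]
      simp [List.getElem?_drop, hnone]
    simp [hp]

lemma block5 (s : String) (j : Nat) (a b c d e : Char) (counter : Int) :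
    (if PySem.Str.len s - (j : Int) ≥ 5 then
      if PySem.Str.pyGet? s (j : Int) = some a then
        if PySem.Str.pyGet? s ((j : Int) + 1) = some b then
          if PySem.Str.pyGet? s ((j : Int) + 2) = some c then
            if PySem.Str.pyGet? s ((j : Int) + 3) = some d then
              if PySem.Str.pyGet? s ((j : Int) + 4) = some e then counter + 1
              else counter
            else counter
          else counter
        else counter
      else counter
    else counter)
    = counter + (if [a, b, c, d, e].isPrefixOf (s.toList.drop j) then (1 : Int) else 0) := by
  have h0 : PySem.Str.pyGet? s (j : Int) = s.toList[j]? := by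
    rw [PySem.Str.pyGet?_eq, PySem.Chars.pyGet?_eq_listPyGet?, PySem.List.pyGet?_natCast]
  have h1 : PySem.Str.pyGet? s ((j : Int) + 1) = s.toList[j + 1]? := by
    rw [PySem.Str.pyGet?_eq, PySem.Chars.pyGet?_eq_listPyGet?,
      show ((j : Int) + 1) = ((j + 1 : Nat) : Int) by push_cast; ring, PySem.List.pyGet?_natCast]
  have h2 : PySem.Str.pyGet? s ((j : Int) + 2) = s.toList[j + 2]? := by
    rw [PySem.Str.pyGet?_eq, PySem.Chars.pyGet?_eq_listPyGet?,
      show ((j : Int) + 2) = ((j + 2 : Nat) : Int) by push_cast; ring, PySem.List.pyGet?_natCast]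
  have h3 : PySem.Str.pyGet? s ((j : Int) + 3) = s.toList[j + 3]? := by
    rw [PySem.Str.pyGet?_eq, PySem.Chars.pyGet?_eq_listPyGet?,
      show ((j : Int) + 3) = ((j + 3 : Nat) : Int) by push_cast; ring, PySem.List.pyGet?_natCast]
  have h4 : PySem.Str.pyGet? s ((j : Int) + 4) = s.toList[j + 4]? := by
    rw [PySem.Str.pyGet?_eq, PySem.Chars.pyGet?_eq_listPyGet?,
      show ((j : Int) + 4) = ((j + 4 : Nat) : Int) by push_cast; ring, PySem.List.pyGet?_natCast]
  rw [PySem.Str.len_eq, h0, h1, h2, h3, h4]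
  by_cases h : j + 5 ≤ s.toList.length
  · rw [if_pos (by omega)]
    have hp := prefix5_iff (s.toList.drop j) a b c d e
    simp only [List.getElem?_drop] at hp
    split_ifs <;> simp_all
  · rw [if_neg (by omega)]
    have hnone : s.toList[j + 4]? = none := by
      rw [List.getElem?_eq_none_iff]; omega
    have hp : ¬ ([a, b, c, d, e].isPrefixOf (s.toList.drop j) = true) := by
      rw [prefix5_iff]
      simp [List.getElem?_drop, hnone]
    simp [hp]

-- count.go on a word that cannot overlap itself (hstep) visits every start position
lemma go_spec (w : List Char) (hw : w ≠ [])
    (hstep : ∀ rest : List Char, suffCount w (w ++ rest) = 1 + suffCount w rest) :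
    ∀ (fuel : Nat) (cs : List Char) (acc : Nat), cs.length ≤ fuel →
      PySem.Chars.count.go w fuel cs acc = acc + suffCount w cs := by
  intro fuel
  induction fuel with
  | zero =>
    intro cs acc h
    have : cs = [] := by cases cs <;> simp_all
    subst this
    simp [PySem.Chars.count.go, suffCount]
  | succ fuel ih =>
    intro cs acc h
    cases cs with
    | nil => simp [PySem.Chars.count.go, suffCount]
    | cons c t =>
      rw [PySem.Chars.count.go]
      by_cases hp : (w.isPrefixOf (c :: t)) = true
      · rw [if_pos hp]
        obtain ⟨rest, hrest⟩ : ∃ rest, w ++ rest = c :: t := List.isPrefixOf_iff_prefix.mp hp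
        rw [← hrest, List.drop_left, hstep rest]
        have hlr : rest.length ≤ fuel := by
          have hw1 : 1 ≤ w.length := by
            cases w with
            | nil => exact absurd rfl hw
            | cons _ _ => simp
          have hlen : w.length + rest.length = t.length + 1 := by
            have h2 := congrArg List.length hrest
            simp [List.length_append] at h2
            omega
          have h' : t.length + 1 ≤ fuel + 1 := by simpa using h
          omega
        rw [ih rest (acc + 1) hlr]
        omega
      · rw [if_neg hp]
        rw [ih t acc (by simpa using Nat.le_of_succ_le_succ h)]
        simp [suffCount, hp]

lemma count_eq_suffCount (w : List Char) (hw : w ≠ [])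
    (hstep : ∀ rest : List Char, suffCount w (w ++ rest) = 1 + suffCount w rest)
    (cs : List Char) : PySem.Chars.count cs w = suffCount w cs := by
  have hne : w.isEmpty = false := by cases w <;> simp_all
  rw [PySem.Chars.count, hne]
  simpa using go_spec w hw hstep cs.length cs 0 le_rfl

lemma hstep_sand : ∀ rest : List Char,
    suffCount ['s', 'a', 'n', 'd'] (['s', 'a', 'n', 'd'] ++ rest) = 1 + suffCount ['s', 'a', 'n', 'd'] rest := by
  intro rest; simp [suffCount, List.isPrefixOf]

lemma hstep_water : ∀ rest : List Char,
    suffCount ['w', 'a', 't', 'e', 'r'] (['w', 'a', 't', 'e', 'r'] ++ rest) = 1 + suffCount ['w', 'a', 't', 'e', 'r'] rest := by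
  intro rest; simp [suffCount, List.isPrefixOf]

lemma hstep_fish : ∀ rest : List Char,
    suffCount ['f', 'i', 's', 'h'] (['f', 'i', 's', 'h'] ++ rest) = 1 + suffCount ['f', 'i', 's', 'h'] rest := by
  intro rest; simp [suffCount, List.isPrefixOf]

lemma hstep_sun : ∀ rest : List Char,
    suffCount ['s', 'u', 'n'] (['s', 'u', 'n'] ++ rest) = 1 + suffCount ['s', 'u', 'n'] rest := by
  intro rest; simp [suffCount, List.isPrefixOf]

-- ===== VERDICT (by name: the statement is the Claim_ definition above) =====
theorem beach_counter_spec : Claim_equal_beach_counter := by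
  intro string _
  unfold Spec_beach_counter
  unfold beach_counter beach_counter_alt
  rw [show PySem.List.pyRange 0 (PySem.Str.len string)
        = List.map (fun k : Nat => (k : Int)) (List.range string.toList.length) from by
      rw [PySem.Str.len_eq, PySem.List.pyRange_zero_natCast]]
  rw [List.foldl_map]
  rw [PySem.List.foldl_congr_mem _ _
    (fun (acc : Int) (j : Nat) => acc +
      ((if List.isPrefixOf ['s', 'a', 'n', 'd'] (string.toList.drop j) then (1 : Int) else 0) +
       (if List.isPrefixOf ['w', 'a', 't', 'e', 'r'] (string.toList.drop j) then (1 : Int) else 0) +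
       (if List.isPrefixOf ['f', 'i', 's', 'h'] (string.toList.drop j) then (1 : Int) else 0) +
       (if List.isPrefixOf ['s', 'u', 'n'] (string.toList.drop j) then (1 : Int) else 0))) 0
    (by
      intro acc j hj
      dsimp only
      rw [block4 string j 's' 'a' 'n' 'd' acc]
      rw [block5 string j 'w' 'a' 't' 'e' 'r']
      rw [block4 string j 'f' 'i' 's' 'h']
      rw [block3 string j 's' 'u' 'n']
      ring)]
  rw [PySem.List.foldl_add, zero_add]
  rw [PySem.List.sum_map_add_int _
    (fun j => (if List.isPrefixOf ['s', 'a', 'n', 'd'] (string.toList.drop j) then (1 : Int) else 0) +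
      (if List.isPrefixOf ['w', 'a', 't', 'e', 'r'] (string.toList.drop j) then (1 : Int) else 0) +
      (if List.isPrefixOf ['f', 'i', 's', 'h'] (string.toList.drop j) then (1 : Int) else 0))
    (fun j => (if List.isPrefixOf ['s', 'u', 'n'] (string.toList.drop j) then (1 : Int) else 0))]
  rw [PySem.List.sum_map_add_int _
    (fun j => (if List.isPrefixOf ['s', 'a', 'n', 'd'] (string.toList.drop j) then (1 : Int) else 0) +
      (if List.isPrefixOf ['w', 'a', 't', 'e', 'r'] (string.toList.drop j) then (1 : Int) else 0))
    (fun j => (if List.isPrefixOf ['f', 'i', 's', 'h'] (string.toList.drop j) then (1 : Int) else 0))]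
  rw [PySem.List.sum_map_add_int _
    (fun j => (if List.isPrefixOf ['s', 'a', 'n', 'd'] (string.toList.drop j) then (1 : Int) else 0))
    (fun j => (if List.isPrefixOf ['w', 'a', 't', 'e', 'r'] (string.toList.drop j) then (1 : Int) else 0))]
  rw [sum_ind_eq_suffCount, sum_ind_eq_suffCount, sum_ind_eq_suffCount, sum_ind_eq_suffCount]
  have hsand : ("sand" : String).toList = ['s', 'a', 'n', 'd'] := by decide
  have hwater : ("water" : String).toList = ['w', 'a', 't', 'e', 'r'] := by decide
  have hfish : ("fish" : String).toList = ['f', 'i', 's', 'h'] := by decide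
  have hsun : ("sun" : String).toList = ['s', 'u', 'n'] := by decide
  simp only [List.map_cons, List.map_nil, List.sum_cons, List.sum_nil,
    PySem.Str.count_eq, hsand, hwater, hfish, hsun]
  rw [count_eq_suffCount _ (by simp) hstep_sand,
      count_eq_suffCount _ (by simp) hstep_water,
      count_eq_suffCount _ (by simp) hstep_fish,
      count_eq_suffCount _ (by simp) hstep_sun]
  ring
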